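-- pv_equiv track=rewrite | github.com/andrader/roll-allocation-problem | main.py | solve_recursively
-- ===== SOURCE A (Python) =====
-- from typing import List, Tuple, Union
--
-- def solve_recursively(orders: List[int], rolls: List[int]) -> Union[Tuple[int], bool]:
--     """
--     Recursively solves the order allocation problem by finding the optimal way
--     to fulfill the given orders using the available rolls.
--
--     Args:
--         orders (List[int]): A list of order lengths.
--         rolls (List[int]): A list of available roll lengths.
--
--     Returns:
--         Union[Tuple[int], bool]: The indices of rolls allocated for each order if a solution is found,
--             otherwise False.
--     """
--     if not orders:
--         return []
--
--     order = orders[0]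
--     for i, roll_length in enumerate(rolls):
--         if roll_length >= order:
--             remaining_rolls = rolls[:]
--             remaining_rolls[i] = roll_length - order
--             solve_remaining_orders = solve_recursively(orders[1:], remaining_rolls)
--             if isinstance(solve_remaining_orders, list):
--                 return [i] + solve_remaining_orders
--     return None
-- ===== SOURCE B (Python) =====
-- def solve_recursively(orders, rolls):
--     # Iterative explicit-stack DFS instead of recursion; never mutates the caller's rolls.
--     stack = [(list(orders), list(rolls), [], 0)]
--     while stack:
--         ords, rs, path, j = stack.pop()
--         if not ords:
--             return path
--         o = ords[0]
--         while j < len(rs) and rs[j] < o: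
--             j += 1
--         if j < len(rs):
--             stack.append((ords, rs, path, j + 1))
--             nrs = rs.copy()
--             nrs[j] -= o
--             stack.append((ords[1:], nrs, path + [j], 0))
--     return None
-- ===== Notes on version B (the rewrite author's own statement) =====
-- stated objective: alternative
-- what changed: Replaced A's recursive backtracking (recursion on orders with an inner enumerate loop) by an iterative DFS over an explicit stack of frames (remaining orders, private rolls copy, partial index path, next roll index) with the same ascending-index try order.
import Mathlib
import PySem

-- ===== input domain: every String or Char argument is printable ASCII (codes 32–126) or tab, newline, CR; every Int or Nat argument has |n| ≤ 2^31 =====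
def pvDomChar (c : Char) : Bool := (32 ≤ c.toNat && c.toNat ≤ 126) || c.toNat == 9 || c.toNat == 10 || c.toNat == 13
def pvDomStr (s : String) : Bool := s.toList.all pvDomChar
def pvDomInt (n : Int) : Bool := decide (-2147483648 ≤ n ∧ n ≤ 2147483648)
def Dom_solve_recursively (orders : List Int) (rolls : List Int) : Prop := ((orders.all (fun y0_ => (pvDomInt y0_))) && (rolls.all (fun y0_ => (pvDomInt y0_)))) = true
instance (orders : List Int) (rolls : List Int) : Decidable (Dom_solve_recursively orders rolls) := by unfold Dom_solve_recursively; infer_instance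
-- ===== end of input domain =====

-- B replaces A's recursive backtracking by an iterative explicit-stack DFS with the same
-- ascending-index try order (objective: alternative, same asymptotic cost).

-- ===== PORT A =====
-- A: recursion on orders; for each order, a loop over enumerate(rolls) trying ascending indices.
mutual
def solve_recursively (orders : List Int) (rolls : List Int) : Option (List Int) :=
  match orders with
  | [] => some []
  | order :: rest => srLoop order rest rolls 0 rolls
termination_by (orders.length, rolls.length + 1)

-- the 'for i, roll_length in enumerate(rolls)' loop, carrying the running index i
def srLoop (order : Int) (rest : List Int) (rolls : List Int) : Nat → List Int → Option (List Int)
  | _, [] => none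
  | i, roll_length :: more =>
    if order ≤ roll_length then
      match solve_recursively rest (rolls.set i (roll_length - order)) with
      | some r => some ((i : Int) :: r)
      | none => srLoop order rest rolls (i + 1) more
    else srLoop order rest rolls (i + 1) more
termination_by _ xs => (rest.length + 1, xs.length)
end

-- ===== PORT B =====
-- inner while loop of Source B: advance j past rolls that are too short
def pvScan (rs : List Int) (o : Int) (j : Nat) : Nat :=
  if h : j < rs.length then
    if rs[j] < o then pvScan rs o (j + 1) else j
  else j
termination_by rs.length - j

theorem pvScan_ge (rs : List Int) (o : Int) (j : Nat) : j ≤ pvScan rs o j := by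
  fun_induction pvScan rs o j with
  | case1 j h hlt ih => omega
  | case2 j h hge => omega
  | case3 j h => omega

-- a stack frame: (remaining orders, private rolls copy, chosen indices so far, next roll index)
def pvPhi : List Int × List Int × List Int × Nat → Nat
  | (ords, rs, _, j) => (rs.length - j + 1) * (rs.length + 2) ^ ords.length

def pvMeasure (S : List (List Int × List Int × List Int × Nat)) : Nat := (S.map pvPhi).sum

-- the 'while stack:' loop of Source B (stack top at the head)
def runB : List (List Int × List Int × List Int × Nat) → Option (List Int)
  | [] => none
  | (ords, rs, path, j) :: stack =>
    match ords with
    | [] => some path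
    | o :: restOrds =>
      if h : pvScan rs o j < rs.length then
        runB ((restOrds, rs.set (pvScan rs o j) (rs[pvScan rs o j] - o),
               path ++ [((pvScan rs o j : Nat) : Int)], 0) ::
              (o :: restOrds, rs, path, pvScan rs o j + 1) :: stack)
      else
        runB stack
termination_by S => pvMeasure S
decreasing_by
  · have hj : j ≤ pvScan rs o j := pvScan_ge rs o j
    simp only [pvMeasure, pvPhi, List.map_cons, List.sum_cons, List.length_set,
      List.length_cons, pow_succ, Nat.sub_zero]
    have hp : 0 < (rs.length + 2) ^ restOrds.length := pow_pos (by omega) _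
    have h1 : rs.length - (pvScan rs o j + 1) + 1 = rs.length - pvScan rs o j := by omega
    rw [h1]
    have key : (rs.length + 1) * (rs.length + 2) ^ restOrds.length
        + (rs.length - pvScan rs o j) * ((rs.length + 2) ^ restOrds.length * (rs.length + 2))
        < (rs.length - j + 1) * ((rs.length + 2) ^ restOrds.length * (rs.length + 2)) := by
      have hstep : (rs.length + 1) * (rs.length + 2) ^ restOrds.length
          < (rs.length + 2) ^ restOrds.length * (rs.length + 2) := by nlinarith
      have h3 : (rs.length - pvScan rs o j) + 1 ≤ rs.length - j + 1 := by omega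
      calc (rs.length + 1) * (rs.length + 2) ^ restOrds.length
            + (rs.length - pvScan rs o j) * ((rs.length + 2) ^ restOrds.length * (rs.length + 2))
          < (rs.length + 2) ^ restOrds.length * (rs.length + 2)
            + (rs.length - pvScan rs o j) * ((rs.length + 2) ^ restOrds.length * (rs.length + 2)) :=
            Nat.add_lt_add_right hstep _
        _ = ((rs.length - pvScan rs o j) + 1)
            * ((rs.length + 2) ^ restOrds.length * (rs.length + 2)) := by ring
        _ ≤ (rs.length - j + 1) * ((rs.length + 2) ^ restOrds.length * (rs.length + 2)) :=
            Nat.mul_le_mul_right _ h3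
    linarith [key]
  · simp only [pvMeasure, pvPhi, List.map_cons, List.sum_cons]
    have hp : 0 < (rs.length - j + 1) * (rs.length + 2) ^ (o :: restOrds).length :=
      Nat.mul_pos (by omega) (pow_pos (by omega) _)
    omega

def solve_recursively_alt (orders : List Int) (rolls : List Int) : Option (List Int) :=
  runB [(orders, rolls, [], 0)]

-- ===== PRECONDITION & SPEC =====
def Spec_solve_recursively (orders : List Int) (rolls : List Int) (out : Option (List Int)) : Prop := out = solve_recursively_alt orders rolls
instance (orders : List Int) (rolls : List Int) (out : Option (List Int)) : Decidable (Spec_solve_recursively orders rolls out) := by unfold Spec_solve_recursively; infer_instance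

-- ===== CLAIM (what is proved, stated in full; the proofs are below) =====
def Claim_equal_solve_recursively : Prop := ∀ (orders : List Int) (rolls : List Int), Dom_solve_recursively orders rolls → Spec_solve_recursively orders rolls (solve_recursively orders rolls)

-- ===== LEMMAS AND PROOFS =====

-- A's search resumed at roll index j (proof-only helper)
def searchFrom (ords : List Int) (rolls : List Int) (j : Nat) : Option (List Int) :=
  match ords with
  | [] => some []
  | o :: rest => srLoop o rest rolls j (rolls.drop j)

theorem solve_eq_searchFrom (ords rolls : List Int) :
    solve_recursively ords rolls = searchFrom ords rolls 0 := by
  cases ords <;> simp [solve_recursively, searchFrom]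

-- one resumed pass of A's roll loop, phrased through B's scan
theorem srLoop_eq (o : Int) (rest rolls : List Int) (j : Nat) :
    srLoop o rest rolls j (rolls.drop j) =
      if h : pvScan rolls o j < rolls.length then
        match solve_recursively rest
            (rolls.set (pvScan rolls o j) (rolls[pvScan rolls o j] - o)) with
        | some r => some (((pvScan rolls o j : Nat) : Int) :: r)
        | none => srLoop o rest rolls (pvScan rolls o j + 1) (rolls.drop (pvScan rolls o j + 1))
      else none := by
  fun_induction pvScan rolls o j with
  | case1 j h hlt ih =>
    conv_lhs => rw [List.drop_eq_getElem_cons h]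
    rw [srLoop, if_neg (not_le.mpr hlt)]
    exact ih
  | case2 j h hge =>
    rw [dif_pos h]
    conv_lhs => rw [List.drop_eq_getElem_cons h]
    rw [srLoop, if_pos (not_lt.mp hge)]
  | case3 j h =>
    rw [dif_neg h, List.drop_eq_nil_of_le (by omega), srLoop]

-- searchFrom unrolled one step, through B's scan
theorem searchFrom_cons (o : Int) (restOrds rs : List Int) (j : Nat) :
    searchFrom (o :: restOrds) rs j =
      if h : pvScan rs o j < rs.length then
        match searchFrom restOrds (rs.set (pvScan rs o j) (rs[pvScan rs o j] - o)) 0 with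
        | some r => some (((pvScan rs o j : Nat) : Int) :: r)
        | none => searchFrom (o :: restOrds) rs (pvScan rs o j + 1)
      else none := by
  show srLoop o restOrds rs j (rs.drop j) = _
  rw [srLoop_eq]
  simp only [solve_eq_searchFrom]
  rfl

-- semantics of a whole stack
def semStack : List (List Int × List Int × List Int × Nat) → Option (List Int)
  | [] => none
  | (ords, rolls, path, j) :: T =>
    match searchFrom ords rolls j with
    | some res => some (path ++ res)
    | none => semStack T

theorem runB_sem (S : List (List Int × List Int × List Int × Nat)) : runB S = semStack S := by
  fun_induction runB S with
  | case1 => rfl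
  | case2 rs path j stack => simp [semStack, searchFrom]
  | case3 rs path j stack o restOrds h ih =>
    rw [ih]
    simp only [semStack]
    conv_rhs => rw [searchFrom_cons, dif_pos h]
    rw [← solve_eq_searchFrom]
    cases hsolve : solve_recursively restOrds (rs.set (pvScan rs o j) (rs[pvScan rs o j] - o)) with
    | none => simp
    | some r => simp [List.append_assoc]
  | case4 rs path j stack o restOrds h ih =>
    rw [ih]
    simp only [semStack]
    conv_rhs => rw [searchFrom_cons, dif_neg h]

-- ===== VERDICT (by name: the statement is the Claim_ definition above) =====
theorem solve_recursively_spec : Claim_equal_solve_recursively := by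
  intro orders rolls _
  unfold Spec_solve_recursively solve_recursively_alt
  rw [runB_sem, solve_eq_searchFrom]
  simp [semStack]
  cases searchFrom orders rolls 0 <;> simp
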